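-- pv_equiv track=rewrite | github.com/Ev1a23/IntroToCS | hw02-Eviatar/hw2_322623182.py | print_rectangle
-- ===== SOURCE A (Python) =====
-- def print_rectangle(length, width):
--     '''
--     Define how a row in the middle(not first or last) should look like, iterate through it and return final string
--     '''
--     assert (length >=3 and length <=100)
--     assert (width >=3 and width <=100)
--     part_row = "*"+(width-2)*" "+"*"+"\n"
--     str1 = width*"*"+"\n"
--     for i in range(length-2):
--         str1+=part_row
--
--     str1+= width*"*"
--     return(str1)
-- ===== SOURCE B (Python) =====
-- def print_rectangle(length, width):
--     assert (length >=3 and length <=100)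
--     assert (width >=3 and width <=100)
--     rows = []
--     for i in range(length):
--         row = []
--         for j in range(width):
--             row.append('*' if i == 0 or i == length - 1 or j == 0 or j == width - 1 else ' ')
--         rows.append(''.join(row))
--     return '\n'.join(rows)
-- ===== Notes on version B (the rewrite author's own statement) =====
-- stated objective: alternative
-- what changed: B computes each character from its (row, column) coordinates with a per-cell double loop and joins the rows with '\n', instead of concatenating precomputed full-row and middle-row template strings.
import Mathlib
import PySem

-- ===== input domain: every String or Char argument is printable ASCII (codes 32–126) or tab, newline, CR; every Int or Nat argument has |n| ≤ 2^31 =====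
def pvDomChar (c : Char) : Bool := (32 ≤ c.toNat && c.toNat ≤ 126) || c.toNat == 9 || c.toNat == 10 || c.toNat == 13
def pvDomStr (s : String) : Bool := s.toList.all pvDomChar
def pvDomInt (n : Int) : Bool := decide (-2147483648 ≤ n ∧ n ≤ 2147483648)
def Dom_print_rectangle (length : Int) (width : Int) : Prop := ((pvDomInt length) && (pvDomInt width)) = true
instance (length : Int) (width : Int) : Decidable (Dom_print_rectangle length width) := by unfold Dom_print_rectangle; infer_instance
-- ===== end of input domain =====

-- B builds the rectangle per cell from its (row, column) coordinates and joins the rows with '\n',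
-- instead of A's concatenation of precomputed full-row / middle-row template strings (objective: alternative).

-- ===== PORT A =====
-- literal port of A: template rows, then a loop appending the middle-row template length-2 times.
-- (the two asserts are AssertionErrors outside Pre_print_rectangle; under Pre_ they pass)
def print_rectangle (length : Int) (width : Int) : String :=
  -- part_row = "*"+(width-2)*" "+"*"+"\n"   (n*" " with n ≤ 0 is "" in Python = replicate .toNat)
  let part_row : List Char := '*' :: (List.replicate (width - 2).toNat ' ' ++ ['*', '\n'])
  -- str1 = width*"*"+"\n"
  let str1 : List Char := List.replicate width.toNat '*' ++ ['\n']
  -- for i in range(length-2): str1 += part_row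
  let str1 := (PySem.List.pyRange 0 (length - 2) 1).foldl (fun acc _ => acc ++ part_row) str1
  -- str1 += width*"*"
  String.mk (str1 ++ List.replicate width.toNat '*')

-- ===== PORT B =====
-- literal port of Source B: per-cell double loop; each row's chars collected (''.join of 1-char
-- strings = the char list itself), rows joined with '\n'.
def print_rectangle_alt (length : Int) (width : Int) : String :=
  let rows : List (List Char) :=
    (PySem.List.pyRange 0 length 1).map (fun i =>
      (PySem.List.pyRange 0 width 1).map (fun j =>
        if i = 0 ∨ i = length - 1 ∨ j = 0 ∨ j = width - 1 then '*' else ' '))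
  String.mk (PySem.Chars.join ['\n'] rows)

-- ===== PRECONDITION & SPEC =====
-- exactly A's two asserts: outside these bounds A raises AssertionError
def Pre_print_rectangle (length : Int) (width : Int) : Prop :=
  3 ≤ length ∧ length ≤ 100 ∧ 3 ≤ width ∧ width ≤ 100
instance (length : Int) (width : Int) : Decidable (Pre_print_rectangle length width) := by
  unfold Pre_print_rectangle; infer_instance
def pvWitness_print_rectangle : Int × Int := (4, 5)

def Spec_print_rectangle (length : Int) (width : Int) (out : String) : Prop := out = print_rectangle_alt length width
instance (length : Int) (width : Int) (out : String) : Decidable (Spec_print_rectangle length width out) := by unfold Spec_print_rectangle; infer_instance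

-- ===== CLAIM (what is proved, stated in full; the proofs are below) =====
def Claim_equal_print_rectangle : Prop := ∀ (length : Int) (width : Int), Dom_print_rectangle length width → Pre_print_rectangle length width → Spec_print_rectangle length width (print_rectangle length width)

-- ===== LEMMAS AND PROOFS =====

-- A's loop body ignores the loop variable: it appends the template once per iteration.
theorem pv_foldl_append_const {α : Type} (l : List α) (p init : List Char) :
    l.foldl (fun acc _ => acc ++ p) init = init ++ (List.replicate l.length p).flatten := by
  induction l generalizing init with
  | nil => simp
  | cons x xs ih => simp [List.foldl_cons, ih, List.replicate_succ, List.append_assoc]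

-- joining (first :: n middle rows ++ [last]) with '\n' gives A's concatenation shape
theorem pv_join_shape (n : ℕ) (x m y : List Char) :
    PySem.Chars.join ['\n'] (x :: (List.replicate n m ++ [y]))
      = x ++ '\n' :: ((List.replicate n (m ++ ['\n'])).flatten ++ y) := by
  induction n generalizing x with
  | zero => simp [PySem.Chars.join_cons_cons, PySem.Chars.join_singleton]
  | succ k ih =>
      rw [List.replicate_succ, List.cons_append, PySem.Chars.join_cons_cons, ih m]
      simp [List.replicate_succ, List.append_assoc]

-- a map over range n whose value is `a` at both ends and `b` in between, as first/middles/last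
theorem pv_map_range_shape {α : Type} (n : ℕ) (hn : 3 ≤ n) (f : ℕ → α) (a b : α)
    (h0 : f 0 = a) (hl : f (n - 1) = a) (hm : ∀ j, 0 < j → j < n - 1 → f j = b) :
    (List.range n).map f = a :: (List.replicate (n - 2) b ++ [a]) := by
  obtain ⟨k, rfl⟩ : ∃ k, n = k + 2 := ⟨n - 2, by omega⟩
  rw [show k + 2 = (k + 1) + 1 from rfl, List.range_succ, List.range_succ_eq_map]
  simp only [List.map_append, List.map_cons, List.map_map, List.map_nil]
  have hmids : ∀ j ∈ List.range k, (f ∘ Nat.succ) j = b := by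
    intro j hj
    rw [List.mem_range] at hj
    exact hm (j + 1) (by omega) (by omega)
  rw [List.map_congr_left hmids, List.map_const', List.length_range, h0]
  have hl' : f (k + 1) = a := by simpa using hl
  simp [hl']

-- B's boundary row is the full row of stars
theorem pv_row_full (L W : ℕ) (_hW : 3 ≤ W) (i : Int) (h : i = 0 ∨ i = (L : Int) - 1) :
    (PySem.List.pyRange 0 (W : Int) 1).map (fun j =>
        if i = 0 ∨ i = (L : Int) - 1 ∨ j = 0 ∨ j = (W : Int) - 1 then '*' else ' ')
      = List.replicate W '*' := by
  rw [show PySem.List.pyRange 0 (W : Int) 1 = PySem.List.pyRange 0 (W : Int) from rfl,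
      PySem.List.pyRange_zero_natCast W, List.map_map]
  have : ∀ j ∈ List.range W, ((fun j =>
      if i = 0 ∨ i = (L : Int) - 1 ∨ j = 0 ∨ j = (W : Int) - 1 then '*' else ' ') ∘
      (fun k : ℕ => (k : Int))) j = '*' := by
    intro j _; simp [Function.comp]; tauto
  rw [List.map_congr_left this, List.map_const', List.length_range]

-- B's inner row: star, W-2 spaces, star
theorem pv_row_mid (L W : ℕ) (hW : 3 ≤ W) (i : Int) (h1 : i ≠ 0) (h2 : i ≠ (L : Int) - 1) :
    (PySem.List.pyRange 0 (W : Int) 1).map (fun j =>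
        if i = 0 ∨ i = (L : Int) - 1 ∨ j = 0 ∨ j = (W : Int) - 1 then '*' else ' ')
      = '*' :: (List.replicate (W - 2) ' ' ++ ['*']) := by
  rw [show PySem.List.pyRange 0 (W : Int) 1 = PySem.List.pyRange 0 (W : Int) from rfl,
      PySem.List.pyRange_zero_natCast W, List.map_map]
  apply pv_map_range_shape W hW _ '*' ' '
  · simp
  · have : ((W - 1 : ℕ) : Int) = (W : Int) - 1 := by omega
    simp [Function.comp, this]
  · intro j hj1 hj2
    simp only [Function.comp, h1, h2]
    have hb : ¬ ((j : Int) = (W : Int) - 1) := by omega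
    simp [hb]
    omega

-- B's list of rows, for L ≥ 3: full, L-2 middles, full
theorem pv_rows_shape (L W : ℕ) (hL : 3 ≤ L) (hW : 3 ≤ W) :
    (PySem.List.pyRange 0 (L : Int) 1).map (fun i =>
        (PySem.List.pyRange 0 (W : Int) 1).map (fun j =>
          if i = 0 ∨ i = (L : Int) - 1 ∨ j = 0 ∨ j = (W : Int) - 1 then '*' else ' '))
      = List.replicate W '*' ::
          (List.replicate (L - 2) ('*' :: (List.replicate (W - 2) ' ' ++ ['*'])) ++
            [List.replicate W '*']) := by
  rw [show PySem.List.pyRange 0 (L : Int) 1 = PySem.List.pyRange 0 (L : Int) from rfl,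
      PySem.List.pyRange_zero_natCast L, List.map_map]
  apply pv_map_range_shape L hL
  · simpa using pv_row_full L W hW 0 (Or.inl rfl)

  · have hc : ((L - 1 : ℕ) : Int) = (L : Int) - 1 := by omega
    simpa [Function.comp, hc] using pv_row_full L W hW ((L : Int) - 1) (Or.inr rfl)
  · intro j hj1 hj2
    have ha : ((j : ℕ) : Int) ≠ 0 := by omega
    have hb : ((j : ℕ) : Int) ≠ (L : Int) - 1 := by omega
    simpa [Function.comp] using pv_row_mid L W hW (j : Int) ha hb

theorem print_rectangle_eq (length width : Int) (h : Pre_print_rectangle length width) :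
    print_rectangle length width = print_rectangle_alt length width := by
  obtain ⟨h1, h2, h3, h4⟩ := h
  obtain ⟨L, rfl⟩ : ∃ L : ℕ, length = (L : Int) := ⟨length.toNat, by omega⟩
  obtain ⟨W, rfl⟩ : ∃ W : ℕ, width = (W : Int) := ⟨width.toNat, by omega⟩
  have hL : 3 ≤ L := by exact_mod_cast h1
  have hW : 3 ≤ W := by exact_mod_cast h3
  unfold print_rectangle print_rectangle_alt
  simp only
  rw [pv_rows_shape L W hL hW, pv_join_shape]
  rw [show (L : Int) - 2 = ((L - 2 : ℕ) : Int) by omega,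
      show PySem.List.pyRange 0 ((L - 2 : ℕ) : Int) 1 = PySem.List.pyRange 0 ((L - 2 : ℕ) : Int) from rfl,
      PySem.List.pyRange_zero_natCast]
  rw [pv_foldl_append_const, List.length_map, List.length_range]
  rw [show ((W : Int) - 2).toNat = W - 2 by omega, show ((W : Int)).toNat = W by omega]
  congr 1
  simp [List.append_assoc]

-- ===== VERDICT (by name: the statement is the Claim_ definition above) =====
theorem print_rectangle_spec : Claim_equal_print_rectangle := by
  intro length width _ hpre
  unfold Spec_print_rectangle
  exact print_rectangle_eq length width hpre
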